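-- pv_equiv track=rewrite | github.com/ethanfleury03/hubspot-chatbot-insights | get_forms.py | split_country_and_phone
-- ===== SOURCE A (Python) =====
-- from typing import Any, Dict, List, Optional, Tuple
--
-- def extract_phone_digits(s: str) -> str:
--     """
--     Extract phone digits from string, keeping leading + if present.
--     """
--     if not s:
--         return ""
--
--     s = s.strip()
--     has_plus = s.startswith('+')
--
--     # Extract digits
--     digits = ''.join(c for c in s if c.isdigit())
--
--     if has_plus and digits:
--         return '+' + digits
--     return digits
--
-- def split_country_and_phone(s: str) -> Tuple[Optional[str], Optional[str]]:
--     """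
--     Split composite country+phone string into (country, phone).
--     Returns (None, None) if not a composite.
--
--     Handles patterns like "India ()9099903323" or "India 99999999999"
--     """
--     if not s:
--         return (None, None)
--
--     s = s.strip()
--
--     # Check if string contains both letters (including Unicode) and digits
--     has_letters = any(c.isalpha() for c in s)
--     has_digits = any(c.isdigit() for c in s)
--
--     if not (has_letters and has_digits):
--         return (None, None)
--
--     # Extract phone digits (keep leading + if present)
--     phone = extract_phone_digits(s)
--
--     # Extract country: remove all digits and phone-related punctuation
--     country = s
--     # Remove digits and common phone characters
--     for char in '0123456789+-()':
--         country = country.replace(char, ' ')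
--
--     # Extract words: sequences of letters (including Unicode) and spaces
--     words = []
--     current_word = []
--     for char in country:
--         # Include letters (including Unicode) and spaces
--         if char.isalpha() or char.isspace():
--             if char.isalpha():
--                 current_word.append(char)
--             elif current_word:  # Space after a word
--                 words.append(''.join(current_word))
--                 current_word = []
--         elif current_word:  # Non-letter, non-space after a word
--             words.append(''.join(current_word))
--             current_word = []
--
--     if current_word:
--         words.append(''.join(current_word))
--
--     country = ' '.join(words).strip()
--
--     # Validate: phone should have at least 7 digits, country at least 2 chars
--     phone_digits_only = phone.replace('+', '')
--     if len(phone_digits_only) >= 7 and len(country) >= 2: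
--         return (country, phone)
--
--     return (None, None)
-- ===== SOURCE B (Python) =====
-- from typing import Optional, Tuple
--
-- def split_country_and_phone(s: str) -> Tuple[Optional[str], Optional[str]]:
--     """Split composite country+phone string into (country, phone);
--     (None, None) if not a composite.
--
--     Single fused scan: the phone digits, the space-joined country name and
--     the letters/digits flags are all accumulated in one pass over the
--     stripped string, with no helper function, no replace pass and no
--     separate word list to join afterwards."""
--     if not s:
--         return (None, None)
--     s = s.strip()
--     digits = []
--     country_parts = []
--     in_word = False
--     has_alpha = False
--     has_digit = False
--     for c in s:
--         if c.isdigit():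
--             digits.append(c)
--             has_digit = True
--             in_word = False
--         elif c.isalpha():
--             has_alpha = True
--             if not in_word:
--                 if country_parts:
--                     country_parts.append(' ')
--                 in_word = True
--             country_parts.append(c)
--         else:
--             in_word = False
--     if not (has_alpha and has_digit):
--         return (None, None)
--     digit_str = ''.join(digits)
--     phone = '+' + digit_str if (s.startswith('+') and digits) else digit_str
--     country = ''.join(country_parts)
--     if len(digits) >= 7 and len(country) >= 2:
--         return (country, phone)
--     return (None, None)
-- ===== Notes on version B (the rewrite author's own statement) =====
-- stated objective: alternative
-- what changed: A makes five staged passes (letter scan, digit scan, the extract_phone_digits helper, a replace pass over '0123456789+-()', then a word state machine plus join/strip); B is one fused left-to-right scan that accumulates the phone digits, the already-space-joined country string and both composite flags simultaneously, with no helper, no replace pass and no intermediate word list.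
import Mathlib
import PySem

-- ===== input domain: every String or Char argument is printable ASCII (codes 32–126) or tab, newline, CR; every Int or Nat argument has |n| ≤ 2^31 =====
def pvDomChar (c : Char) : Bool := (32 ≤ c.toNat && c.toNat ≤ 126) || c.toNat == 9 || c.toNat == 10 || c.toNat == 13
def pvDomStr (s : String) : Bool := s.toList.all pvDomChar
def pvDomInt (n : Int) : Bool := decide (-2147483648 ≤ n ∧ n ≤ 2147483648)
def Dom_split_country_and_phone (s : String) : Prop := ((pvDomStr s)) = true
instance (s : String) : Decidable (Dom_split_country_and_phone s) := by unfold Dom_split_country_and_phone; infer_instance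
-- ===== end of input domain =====

-- B replaces A's staged passes (letter scan, digit scan, extract_phone_digits, the
-- replace pass over '0123456789+-()', the word state machine + join/strip) by one
-- fused scan accumulating digits, country and flags together (alternative decomposition).

-- ===== PORT A =====
-- helper of A: extract_phone_digits
def extract_phone_digits (s : String) : String :=
  if s.toList = [] then "" else
  let cs := PySem.Chars.strip s.toList
  let hasPlus := PySem.Chars.startswith cs ['+']
  let digits := cs.filter PySem.Chars.isdigit
  if hasPlus && !digits.isEmpty then String.ofList ('+' :: digits) else String.ofList digits

-- the body of A's word loop (current_word/words state machine), one step
def pvWordStep (p : List (List Char) × List Char) (ch : Char) :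
    List (List Char) × List Char :=
  if PySem.Chars.isalpha ch || PySem.Chars.isspace ch then
    if PySem.Chars.isalpha ch then (p.1, p.2 ++ [ch])
    else if p.2.isEmpty then p else (p.1 ++ [p.2], [])
  else if p.2.isEmpty then p else (p.1 ++ [p.2], [])

-- A's replace loop over '0123456789+-()'
def pvReplacePass (cs : List Char) : List Char :=
  ['0','1','2','3','4','5','6','7','8','9','+','-','(',')'].foldl
      (fun acc ch => PySem.Chars.replace acc [ch] [' ']) cs

-- A's final flush of current_word, then ' '.join(words).strip()
def pvFlushJoin (st : List (List Char) × List Char) : List Char :=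
  PySem.Chars.strip (PySem.Chars.join [' ']
    (if st.2.isEmpty then st.1 else st.1 ++ [st.2]))

-- A's country block: replace pass, word state machine, flush and join
def pvCountryA (cs : List Char) : List Char :=
  pvFlushJoin ((pvReplacePass cs).foldl pvWordStep ([], []))

def split_country_and_phone (s : String) : Option String × Option String :=
  if s.toList = [] then (none, none) else
  let cs := PySem.Chars.strip s.toList
  let hasLetters := cs.any PySem.Chars.isalpha
  let hasDigits := cs.any PySem.Chars.isdigit
  if !(hasLetters && hasDigits) then (none, none) else
  let phone := extract_phone_digits (String.ofList cs)
  let country := pvCountryA cs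
  let phoneDigitsOnly := PySem.Chars.replace phone.toList ['+'] []
  if 7 ≤ phoneDigitsOnly.length ∧ 2 ≤ country.length then
    (some (String.ofList country), some phone)
  else (none, none)

-- ===== PORT B =====
-- the body of Source B's single fused loop, one step; state =
-- (digits, country_parts, in_word, has_alpha, has_digit)
def pvBStep (st : List Char × List Char × Bool × Bool × Bool) (c : Char) :
    List Char × List Char × Bool × Bool × Bool :=
  match st with
  | (digits, parts, inWord, hasA, hasD) =>
    if PySem.Chars.isdigit c then (digits ++ [c], parts, false, hasA, true)
    else if PySem.Chars.isalpha c then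
      if inWord then (digits, parts ++ [c], true, true, hasD)
      else (digits, (if !parts.isEmpty then parts ++ [' '] else parts) ++ [c], true, true, hasD)
    else (digits, parts, false, hasA, hasD)

def split_country_and_phone_alt (s : String) : Option String × Option String :=
  if s.toList = [] then (none, none) else
  let cs := PySem.Chars.strip s.toList
  match cs.foldl pvBStep ([], [], false, false, false) with
  | (digits, parts, _, hasA, hasD) =>
    if !(hasA && hasD) then (none, none) else
    let phone := if PySem.Chars.startswith cs ['+'] && !digits.isEmpty
                 then '+' :: digits else digits
    if 7 ≤ digits.length ∧ 2 ≤ parts.length then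
      (some (String.ofList parts), some (String.ofList phone))
    else (none, none)

-- ===== PRECONDITION & SPEC =====
def Spec_split_country_and_phone (s : String) (out : Option String × Option String) : Prop := out = split_country_and_phone_alt s
instance (s : String) (out : Option String × Option String) : Decidable (Spec_split_country_and_phone s out) := by unfold Spec_split_country_and_phone; infer_instance

-- ===== CLAIM (what is proved, stated in full; the proofs are below) =====
def Claim_equal_split_country_and_phone : Prop := ∀ (s : String), Dom_split_country_and_phone s → Spec_split_country_and_phone s (split_country_and_phone s)

-- ===== LEMMAS AND PROOFS =====

-- A-side machine words joined with the pending word flushed: what B's parts hold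
def pvEmit (words : List (List Char)) (cur : List Char) : List Char :=
  PySem.Chars.join [' '] (if cur.isEmpty then words else words ++ [cur])

-- ASCII letters are never whitespace (PySem's isalpha is the two ASCII ranges)
theorem pv_alpha_not_space (c : Char) (h : PySem.Chars.isalpha c = true) :
    PySem.Chars.isspace c = false := by
  simp only [PySem.Chars.isalpha, PySem.Chars.islower, PySem.Chars.isupper,
    Bool.or_eq_true, Bool.and_eq_true, decide_eq_true_eq, Char.le_def,
    UInt32.le_iff_toNat_le] at h
  simp only [PySem.Chars.isspace, Bool.or_eq_false_iff, Bool.and_eq_false_iff,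
    decide_eq_false_iff_not]
  have h1 : 'a'.val.toNat = 97 := rfl
  have h2 : 'z'.val.toNat = 122 := rfl
  have h3 : 'A'.val.toNat = 65 := rfl
  have h4 : 'Z'.val.toNat = 90 := rfl
  simp only [Char.toNat, h1, h2, h3, h4] at *
  omega

-- digits are not letters
theorem pv_digit_not_alpha (c : Char) (h : PySem.Chars.isdigit c = true) :
    PySem.Chars.isalpha c = false := by
  simp only [PySem.Chars.isdigit, Bool.and_eq_true, decide_eq_true_eq, Char.le_def,
    UInt32.le_iff_toNat_le] at h
  simp only [PySem.Chars.isalpha, PySem.Chars.islower, PySem.Chars.isupper,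
    Bool.or_eq_false_iff, Bool.and_eq_false_iff, decide_eq_false_iff_not,
    Char.le_def, UInt32.le_iff_toNat_le]
  have h0 : '0'.val.toNat = 48 := rfl
  have h9 : '9'.val.toNat = 57 := rfl
  have h1 : 'a'.val.toNat = 97 := rfl
  have h2 : 'z'.val.toNat = 122 := rfl
  have h3 : 'A'.val.toNat = 65 := rfl
  have h4 : 'Z'.val.toNat = 90 := rfl
  simp only [h0, h9, h1, h2, h3, h4] at *
  omega

-- digits are not '+'
theorem pv_digit_ne_plus (c : Char) (h : PySem.Chars.isdigit c = true) : c ≠ '+' := by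
  intro hc
  subst hc
  exact absurd h (by decide)

-- A's word step on a non-letter only flushes the pending word
theorem pv_wordStep_nonalpha (p : List (List Char) × List Char) (c : Char)
    (h : PySem.Chars.isalpha c = false) :
    pvWordStep p c = if p.2.isEmpty then p else (p.1 ++ [p.2], []) := by
  cases hs : PySem.Chars.isspace c <;> simp [pvWordStep, h, hs]

-- replacing one character by a list is a flatMap
theorem pv_replace_go_one (a : Char) (r : List Char) :
    ∀ (l : List Char) (fuel : Nat) (acc : List Char), l.length ≤ fuel →
    PySem.Chars.replace.go [a] r fuel l acc
      = acc.reverse ++ l.flatMap (fun c => if c = a then r else [c]) := by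
  intro l
  induction l with
  | nil =>
    intro fuel acc _
    cases fuel <;> simp [PySem.Chars.replace.go]
  | cons c t ih =>
    intro fuel acc hf
    cases fuel with
    | zero => simp at hf
    | succ f =>
      simp only [PySem.Chars.replace.go]
      by_cases hc : c = a
      · subst hc
        have hp : [c].isPrefixOf (c :: t) = true := by simp [List.isPrefixOf]
        rw [if_pos hp]
        simp only [List.length_cons] at hf
        simp only [List.length_cons, List.length_nil, List.drop_succ_cons, List.drop_zero]
        rw [ih f _ (by omega)]
        simp
      · have hp : [a].isPrefixOf (c :: t) = false := by
          simp [List.isPrefixOf]; exact fun h => absurd h.symm hc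
        rw [if_neg (by simp [hp])]
        simp only [List.length_cons] at hf
        rw [ih f _ (by omega)]
        simp [hc]

theorem pv_replace_one (cs : List Char) (a : Char) (r : List Char) :
    PySem.Chars.replace cs [a] r = cs.flatMap (fun c => if c = a then r else [c]) := by
  rw [PySem.Chars.replace]
  simp only [List.isEmpty_cons, if_neg Bool.false_ne_true]
  rw [pv_replace_go_one a r cs cs.length [] le_rfl]
  rfl

theorem pv_replace_single (cs : List Char) (a b : Char) :
    PySem.Chars.replace cs [a] [b] = cs.map (fun c => if c = a then b else c) := by
  rw [pv_replace_one]
  induction cs with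
  | nil => rfl
  | cons c t ih => by_cases hc : c = a <;> simp [hc, ih]

-- Source B's view of a character: keep letters, blank the rest (proof-side notion)
def pvSanitize (c : Char) : Char := if PySem.Chars.isalpha c then c else ' '

-- A's replace pass only turns non-letters into ' ', so it does not change the
-- letters-blanked image of the string
theorem pv_map_sanitize_foldl_replace (L : List Char)
    (hL : ∀ x ∈ L, PySem.Chars.isalpha x = false) :
    ∀ cs : List Char,
    (L.foldl (fun acc ch => PySem.Chars.replace acc [ch] [' ']) cs).map pvSanitize
      = cs.map pvSanitize := by
  induction L with
  | nil => intro cs; rfl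
  | cons a L ih =>
    intro cs
    simp only [List.foldl_cons]
    rw [ih (fun x hx => hL x (List.mem_cons_of_mem a hx))]
    rw [pv_replace_single, List.map_map]
    apply List.map_congr_left
    intro c _
    by_cases hc : c = a
    · subst hc
      simp [pvSanitize, hL c (List.mem_cons_self ..)]
    · simp [Function.comp, hc]

-- the word step sees only the letters-blanked character
theorem pv_wordStep_sanitize (p : List (List Char) × List Char) (c : Char) :
    pvWordStep p (pvSanitize c) = pvWordStep p c := by
  by_cases ha : PySem.Chars.isalpha c = true
  · simp [pvSanitize, ha]
  · have ha' : PySem.Chars.isalpha c = false := by simpa using ha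
    rw [pv_wordStep_nonalpha _ _ ha']
    simp only [pvSanitize, ha', Bool.false_eq_true, if_false]
    rw [pv_wordStep_nonalpha]
    decide

-- hence folding the machine over the replaced string = folding it over cs itself
theorem pv_machine_over_replaced (cs : List Char) (init : List (List Char) × List Char) :
    (pvReplacePass cs).foldl pvWordStep init = cs.foldl pvWordStep init := by
  unfold pvReplacePass
  have hL : ∀ x ∈ (['0','1','2','3','4','5','6','7','8','9','+','-','(',')'] : List Char),
      PySem.Chars.isalpha x = false := by intro x hx; fin_cases hx <;> decide
  have hfun : (fun (a : List (List Char) × List Char) c => pvWordStep a (pvSanitize c))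
      = pvWordStep := by
    funext a c; exact pv_wordStep_sanitize a c
  have key : ∀ ds : List Char, ds.foldl pvWordStep init
      = (ds.map pvSanitize).foldl pvWordStep init := by
    intro ds
    rw [List.foldl_map, hfun]
  rw [key, pv_map_sanitize_foldl_replace _ hL, ← key]

-- the machine only ever emits nonempty all-letter words
theorem pv_machine_words_alpha :
    ∀ (ds : List Char) (words : List (List Char)) (cur : List Char),
    (∀ w ∈ words, w ≠ [] ∧ ∀ c ∈ w, PySem.Chars.isalpha c = true) →
    (∀ c ∈ cur, PySem.Chars.isalpha c = true) →
    ∀ w ∈ (if (ds.foldl pvWordStep (words, cur)).2.isEmpty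
           then (ds.foldl pvWordStep (words, cur)).1
           else (ds.foldl pvWordStep (words, cur)).1 ++ [(ds.foldl pvWordStep (words, cur)).2]),
      w ≠ [] ∧ ∀ c ∈ w, PySem.Chars.isalpha c = true := by
  intro ds
  induction ds with
  | nil =>
    intro words cur hw hc
    by_cases h : cur = []
    · subst h; simpa using hw
    · have h' : cur.isEmpty = false := by simpa using h
      simp only [List.foldl_nil, h', Bool.false_eq_true, if_false]
      intro w hmem
      rcases List.mem_append.1 hmem with h1 | h1
      · exact hw w h1
      · simp only [List.mem_singleton] at h1
        exact ⟨h1 ▸ h, h1 ▸ hc⟩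
  | cons c ds ih =>
    intro words cur hw hc
    simp only [List.foldl_cons]
    by_cases ha : PySem.Chars.isalpha c = true
    · have h2 : pvWordStep (words, cur) c = (words, cur ++ [c]) := by
        simp [pvWordStep, ha]
      rw [h2]
      refine ih words (cur ++ [c]) hw ?_
      intro x hx
      rcases List.mem_append.1 hx with h1 | h1
      · exact hc x h1
      · simp only [List.mem_singleton] at h1; exact h1 ▸ ha
    · have ha' : PySem.Chars.isalpha c = false := by simpa using ha
      rw [pv_wordStep_nonalpha _ _ ha']
      by_cases hcur : cur = []
      · simp only [hcur, List.isEmpty_nil, if_true]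
        exact ih words [] hw (by simp)
      · have hcur' : cur.isEmpty = false := by simpa using hcur
        simp only [hcur', Bool.false_eq_true, if_false]
        refine ih (words ++ [cur]) [] ?_ (by simp)
        intro w hmem
        rcases List.mem_append.1 hmem with h1 | h1
        · exact hw w h1
        · simp only [List.mem_singleton] at h1
          exact ⟨h1 ▸ hcur, h1 ▸ hc⟩

theorem pv_dropWhile_alpha (l : List Char) (h : ∀ c ∈ l, PySem.Chars.isalpha c = true) :
    List.dropWhile PySem.Chars.isspace l = l := by
  rw [List.dropWhile_eq_self_iff]
  intro hl
  rw [pv_alpha_not_space _ (h _ (List.getElem_mem hl))]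
  simp

theorem pv_join_ne_nil (ws : List (List Char))
    (h : ∀ w ∈ ws, w ≠ []) (hne : ws ≠ []) :
    PySem.Chars.join [' '] ws ≠ [] := by
  match ws with
  | [] => exact absurd rfl hne
  | [w] => rw [PySem.Chars.join_singleton]; exact h w (by simp)
  | w :: q :: rest => rw [PySem.Chars.join_cons_cons]; simp

-- join with one word appended at the back
theorem pv_join_snoc : ∀ (ws : List (List Char)) (w : List Char),
    PySem.Chars.join [' '] (ws ++ [w])
      = if ws = [] then w else PySem.Chars.join [' '] ws ++ ' ' :: w := by
  intro ws
  induction ws with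
  | nil =>
    intro w
    rw [List.nil_append, PySem.Chars.join_singleton, if_pos rfl]
  | cons x rest ih =>
    intro w
    rw [if_neg (by simp)]
    cases rest with
    | nil =>
      rw [List.singleton_append, PySem.Chars.join_cons_cons, PySem.Chars.join_singleton,
        PySem.Chars.join_singleton]
      simp
    | cons y q =>
      have e2 := ih w
      rw [if_neg (by simp)] at e2
      simp only [List.cons_append] at e2 ⊢
      rw [PySem.Chars.join_cons_cons, e2, PySem.Chars.join_cons_cons]
      simp

-- ' '.join of nonempty all-letter words has no leading whitespace …
theorem pv_lstrip_join (ws : List (List Char))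
    (h : ∀ w ∈ ws, w ≠ [] ∧ ∀ c ∈ w, PySem.Chars.isalpha c = true) :
    PySem.Chars.lstrip (PySem.Chars.join [' '] ws) = PySem.Chars.join [' '] ws := by
  match ws with
  | [] => rw [PySem.Chars.join_nil]; rfl
  | [w] =>
    rw [PySem.Chars.join_singleton, PySem.Chars.lstrip]
    exact pv_dropWhile_alpha w (h w (by simp)).2
  | w :: q :: rest =>
    rw [PySem.Chars.join_cons_cons, PySem.Chars.lstrip, List.append_assoc,
      List.dropWhile_append]
    rw [pv_dropWhile_alpha w (h w (by simp)).2]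
    rw [List.isEmpty_eq_false_iff.2 (h w (by simp)).1]
    simp

-- … and no trailing whitespace either
theorem pv_rstrip_join (ws : List (List Char))
    (h : ∀ w ∈ ws, w ≠ [] ∧ ∀ c ∈ w, PySem.Chars.isalpha c = true) :
    PySem.Chars.rstrip (PySem.Chars.join [' '] ws) = PySem.Chars.join [' '] ws := by
  match ws with
  | [] => rw [PySem.Chars.join_nil]; rfl
  | [w] =>
    rw [PySem.Chars.join_singleton, PySem.Chars.rstrip]
    rw [pv_dropWhile_alpha w.reverse (by intro c hc; exact (h w (by simp)).2 c (List.mem_reverse.1 hc))]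
    exact List.reverse_reverse w
  | w :: q :: rest =>
    have ih := pv_rstrip_join (q :: rest) (fun x hx => h x (List.mem_cons_of_mem w hx))
    have hj : PySem.Chars.join [' '] (q :: rest) ≠ [] :=
      pv_join_ne_nil (q :: rest) (fun x hx => (h x (List.mem_cons_of_mem w hx)).1) (by simp)
    have hdw : List.dropWhile PySem.Chars.isspace (PySem.Chars.join [' '] (q :: rest)).reverse
        = (PySem.Chars.join [' '] (q :: rest)).reverse := by
      rw [PySem.Chars.rstrip] at ih
      have := congrArg List.reverse ih
      simpa using this
    rw [PySem.Chars.join_cons_cons, PySem.Chars.rstrip]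
    rw [show (w ++ [' '] ++ PySem.Chars.join [' '] (q :: rest)).reverse
        = (PySem.Chars.join [' '] (q :: rest)).reverse ++ (' ' :: w.reverse) by simp]
    rw [List.dropWhile_append, hdw]
    rw [List.isEmpty_eq_false_iff.2 (by simpa using hj)]
    simp
  termination_by ws.length

theorem pv_strip_join (ws : List (List Char))
    (h : ∀ w ∈ ws, w ≠ [] ∧ ∀ c ∈ w, PySem.Chars.isalpha c = true) :
    PySem.Chars.strip (PySem.Chars.join [' '] ws) = PySem.Chars.join [' '] ws := by
  rw [PySem.Chars.strip, pv_lstrip_join ws h, pv_rstrip_join ws h]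

-- parts is empty exactly when no word has been emitted yet
theorem pv_emit_nil_iff (words : List (List Char)) (h : ∀ w ∈ words, w ≠ []) :
    pvEmit words [] = [] ↔ words = [] := by
  unfold pvEmit
  rw [if_pos List.isEmpty_nil]
  constructor
  · intro he
    by_contra hne
    exact pv_join_ne_nil words h hne he
  · intro hw; subst hw; rw [PySem.Chars.join_nil]

-- THE SIMULATION: B's single fused fold computes, in one pass, the digit filter,
-- the flags, and the joined-and-flushed words of A's machine
theorem pv_sim : ∀ (cs digits : List Char) (words : List (List Char)) (cur : List Char)
    (hasA hasD : Bool), (∀ w ∈ words, w ≠ []) →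
    (cs.foldl pvBStep (digits, pvEmit words cur, !cur.isEmpty, hasA, hasD)
      = (digits ++ cs.filter PySem.Chars.isdigit,
         pvEmit (cs.foldl pvWordStep (words, cur)).1 (cs.foldl pvWordStep (words, cur)).2,
         !((cs.foldl pvWordStep (words, cur)).2).isEmpty,
         hasA || cs.any PySem.Chars.isalpha,
         hasD || cs.any PySem.Chars.isdigit))
    ∧ (∀ w ∈ (cs.foldl pvWordStep (words, cur)).1, w ≠ []) := by
  intro cs
  induction cs with
  | nil =>
    intro digits words cur hasA hasD hw
    exact ⟨by simp, fun w hwm => hw w hwm⟩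
  | cons c cs ih =>
    intro digits words cur hasA hasD hw
    simp only [List.foldl_cons]
    by_cases hd : PySem.Chars.isdigit c = true
    · have ha := pv_digit_not_alpha c hd
      have hstepB : pvBStep (digits, pvEmit words cur, !cur.isEmpty, hasA, hasD) c
          = (digits ++ [c], pvEmit words cur, false, hasA, true) := by
        simp [pvBStep, hd]
      rw [hstepB, pv_wordStep_nonalpha _ _ ha]
      by_cases hc : cur = []
      · subst hc
        rw [if_pos List.isEmpty_nil]
        have H := ih (digits ++ [c]) words [] hasA true hw
        simp only [List.isEmpty_nil, Bool.not_true] at H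
        refine ⟨?_, H.2⟩
        rw [H.1]
        simp [List.filter_cons, List.any_cons, hd, ha, List.append_assoc]
      · have hc' : cur.isEmpty = false := by simpa using hc
        rw [hc', if_neg Bool.false_ne_true]
        have hw' : ∀ w ∈ words ++ [cur], w ≠ [] := by
          intro w hmem
          rcases List.mem_append.1 hmem with h1 | h1
          · exact hw w h1
          · simp only [List.mem_singleton] at h1; exact h1 ▸ hc
        have hemit : pvEmit words cur = pvEmit (words ++ [cur]) [] := by
          unfold pvEmit
          rw [hc', if_neg Bool.false_ne_true, if_pos List.isEmpty_nil]
        rw [hemit]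
        have H := ih (digits ++ [c]) (words ++ [cur]) [] hasA true hw'
        simp only [List.isEmpty_nil, Bool.not_true] at H
        refine ⟨?_, H.2⟩
        rw [H.1]
        simp [List.filter_cons, List.any_cons, hd, ha, List.append_assoc]
    · have hd' : PySem.Chars.isdigit c = false := by simpa using hd
      by_cases ha : PySem.Chars.isalpha c = true
      · have hstepA : pvWordStep (words, cur) c = (words, cur ++ [c]) := by
          simp [pvWordStep, ha]
        have hstepB : pvBStep (digits, pvEmit words cur, !cur.isEmpty, hasA, hasD) c
            = (digits, pvEmit words (cur ++ [c]), true, true, hasD) := by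
          simp only [pvBStep, hd', Bool.false_eq_true, if_false, ha, if_true]
          by_cases hc : cur = []
          · subst hc
            simp only [List.isEmpty_nil, Bool.not_true, Bool.false_eq_true, if_false]
            congr 1
            by_cases hwnil : words = []
            · subst hwnil
              have h1 : pvEmit [] ([] : List Char) = [] := by
                unfold pvEmit; rw [if_pos List.isEmpty_nil, PySem.Chars.join_nil]
              have h2 : pvEmit [] [c] = [c] := by
                unfold pvEmit
                rw [if_neg (by simp), List.nil_append, PySem.Chars.join_singleton]
              simp [h1, h2]
            · have hne : pvEmit words [] ≠ [] := fun h =>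
                hwnil ((pv_emit_nil_iff words hw).1 h)
              have h2 : pvEmit words [c] = pvEmit words [] ++ [' '] ++ [c] := by
                unfold pvEmit
                rw [if_neg (by simp), if_pos List.isEmpty_nil, pv_join_snoc, if_neg hwnil]
                simp
              simp [h2, List.isEmpty_eq_false_iff.2 hne]
          · have hc' : cur.isEmpty = false := by simpa using hc
            simp only [hc', Bool.not_false, if_true]
            have h2 : pvEmit words (cur ++ [c]) = pvEmit words cur ++ [c] := by
              unfold pvEmit
              rw [hc', if_neg Bool.false_ne_true, if_neg (by simp)]
              rw [pv_join_snoc, pv_join_snoc]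
              by_cases hwnil : words = [] <;> simp [hwnil]
            simp [h2]
        rw [hstepB, hstepA]
        have H := ih digits words (cur ++ [c]) true hasD hw
        simp only [List.isEmpty_eq_false_iff.2 (by simp : cur ++ [c] ≠ ([] : List Char)),
          Bool.not_false] at H
        refine ⟨?_, H.2⟩
        rw [H.1]
        simp [List.filter_cons, List.any_cons, hd', ha]
      · have ha' : PySem.Chars.isalpha c = false := by simpa using ha
        have hstepB : pvBStep (digits, pvEmit words cur, !cur.isEmpty, hasA, hasD) c
            = (digits, pvEmit words cur, false, hasA, hasD) := by
          simp [pvBStep, hd', ha']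
        rw [hstepB, pv_wordStep_nonalpha _ _ ha']
        by_cases hc : cur = []
        · subst hc
          rw [if_pos List.isEmpty_nil]
          have H := ih digits words [] hasA hasD hw
          simp only [List.isEmpty_nil, Bool.not_true] at H
          refine ⟨?_, H.2⟩
          rw [H.1]
          simp [List.filter_cons, List.any_cons, hd', ha']
        · have hc' : cur.isEmpty = false := by simpa using hc
          rw [hc', if_neg Bool.false_ne_true]
          have hw' : ∀ w ∈ words ++ [cur], w ≠ [] := by
            intro w hmem
            rcases List.mem_append.1 hmem with h1 | h1
            · exact hw w h1
            · simp only [List.mem_singleton] at h1; exact h1 ▸ hc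
          have hemit : pvEmit words cur = pvEmit (words ++ [cur]) [] := by
            unfold pvEmit
            rw [hc', if_neg Bool.false_ne_true, if_pos List.isEmpty_nil]
          rw [hemit]
          have H := ih digits (words ++ [cur]) [] hasA hasD hw'
          simp only [List.isEmpty_nil, Bool.not_true] at H
          refine ⟨?_, H.2⟩
          rw [H.1]
          simp [List.filter_cons, List.any_cons, hd', ha']

-- dropWhile is idempotent
theorem pv_dropWhile_idem (p : Char → Bool) (l : List Char) :
    List.dropWhile p (List.dropWhile p l) = List.dropWhile p l := by
  induction l with
  | nil => rfl
  | cons c t ih =>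
    by_cases hc : p c = true
    · simpa [List.dropWhile_cons, hc] using ih
    · simp [List.dropWhile_cons, hc]

-- rstrip yields a prefix, so it cannot create leading whitespace
theorem pv_lstrip_rstrip (l : List Char)
    (h : PySem.Chars.lstrip l = l) :
    PySem.Chars.lstrip (PySem.Chars.rstrip l) = PySem.Chars.rstrip l := by
  have hpre : PySem.Chars.rstrip l <+: l := by
    rw [PySem.Chars.rstrip]
    obtain ⟨t, ht⟩ := List.dropWhile_suffix (l := l.reverse) (p := PySem.Chars.isspace)
    refine ⟨t.reverse, ?_⟩
    have := congrArg List.reverse ht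
    simpa using this
  cases hr : PySem.Chars.rstrip l with
  | nil => rfl
  | cons c t =>
    rw [hr] at hpre
    rcases hpre with ⟨rest, hrest⟩
    rw [PySem.Chars.lstrip, List.dropWhile_cons]
    have hl : l = c :: (t ++ rest) := by rw [← hrest]; simp
    have hcns : PySem.Chars.isspace c = false := by
      by_contra hcs
      have hcs' : PySem.Chars.isspace c = true := by simpa using hcs
      rw [hl, PySem.Chars.lstrip, List.dropWhile_cons, if_pos hcs'] at h
      have h3 : (List.dropWhile PySem.Chars.isspace (t ++ rest)).length
          = (c :: (t ++ rest)).length := by rw [h]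
      have h2 := List.length_dropWhile_le (p := PySem.Chars.isspace) (l := t ++ rest)
      simp only [List.length_cons] at h3
      omega
    simp [hcns]

theorem pv_strip_idem (l : List Char) :
    PySem.Chars.strip (PySem.Chars.strip l) = PySem.Chars.strip l := by
  rw [PySem.Chars.strip, PySem.Chars.strip]
  have hl : PySem.Chars.lstrip (PySem.Chars.lstrip l) = PySem.Chars.lstrip l := by
    rw [PySem.Chars.lstrip, PySem.Chars.lstrip, pv_dropWhile_idem]
  rw [pv_lstrip_rstrip (PySem.Chars.lstrip l) hl]
  rw [PySem.Chars.rstrip, PySem.Chars.rstrip]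
  simp [pv_dropWhile_idem]

-- removing '+' from an all-digit list is the identity
theorem pv_replace_plus_digits (l : List Char) (h : ∀ c ∈ l, PySem.Chars.isdigit c = true) :
    PySem.Chars.replace l ['+'] [] = l := by
  rw [pv_replace_one]
  induction l with
  | nil => rfl
  | cons c t ih =>
    have hc := pv_digit_ne_plus c (h c (by simp))
    simp only [List.flatMap_cons, if_neg hc]
    rw [ih (fun x hx => h x (List.mem_cons_of_mem c hx))]
    rfl

-- ===== VERDICT (by name: the statement is the Claim_ definition above) =====
theorem split_country_and_phone_spec : Claim_equal_split_country_and_phone := by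
  intro s _
  unfold Spec_split_country_and_phone split_country_and_phone split_country_and_phone_alt
  by_cases hnil : s.toList = []
  · simp [hnil]
  · simp only [if_neg hnil]
    set cs := PySem.Chars.strip s.toList with hcs
    have hsim := pv_sim cs [] [] [] false false (by simp)
    have hinit : pvEmit [] ([] : List Char) = ([] : List Char) := by
      unfold pvEmit; rw [if_pos List.isEmpty_nil, PySem.Chars.join_nil]
    rw [hinit] at hsim
    set W := cs.foldl pvWordStep ([], []) with hW
    obtain ⟨hfold, hwne⟩ := hsim
    simp only [List.isEmpty_nil, Bool.not_true, Bool.false_or, List.nil_append] at hfold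
    rw [hfold]
    by_cases hflag : (cs.any PySem.Chars.isalpha && cs.any PySem.Chars.isdigit) = true
    · simp only [hflag, Bool.not_true, Bool.false_eq_true, if_false]
      have hcsne : cs ≠ [] := by
        intro h; rw [h] at hflag; simp at hflag
      -- country
      have halpha := pv_machine_words_alpha cs [] [] (by simp) (by simp)
      rw [← hW] at halpha
      have hcountry : pvCountryA cs = pvEmit W.1 W.2 := by
        unfold pvCountryA pvFlushJoin
        rw [pv_machine_over_replaced cs ([], []), ← hW]
        rw [pv_strip_join _ halpha]
        rfl
      -- phone
      have htl : (String.ofList cs).toList = cs := by simp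
      have hstrip : PySem.Chars.strip cs = cs := by
        rw [hcs]; exact pv_strip_idem s.toList
      have hphone : extract_phone_digits (String.ofList cs)
          = String.ofList (if PySem.Chars.startswith cs ['+']
                && !(cs.filter PySem.Chars.isdigit).isEmpty
              then '+' :: cs.filter PySem.Chars.isdigit
              else cs.filter PySem.Chars.isdigit) := by
        unfold extract_phone_digits
        rw [htl, if_neg hcsne, hstrip]
        by_cases hp : (PySem.Chars.startswith cs ['+']
            && !(cs.filter PySem.Chars.isdigit).isEmpty) = true
        · rw [if_pos hp, if_pos hp]
        · rw [if_neg hp, if_neg hp]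
      rw [hphone, hcountry]
      -- the length condition
      have hdigall : ∀ c ∈ cs.filter PySem.Chars.isdigit, PySem.Chars.isdigit c = true := by
        intro c hc; exact List.of_mem_filter hc
      have hlen : (PySem.Chars.replace (String.ofList
            (if PySem.Chars.startswith cs ['+'] && !(cs.filter PySem.Chars.isdigit).isEmpty
             then '+' :: cs.filter PySem.Chars.isdigit
             else cs.filter PySem.Chars.isdigit)).toList ['+'] []).length
          = (cs.filter PySem.Chars.isdigit).length := by
        by_cases hp : (PySem.Chars.startswith cs ['+']
            && !(cs.filter PySem.Chars.isdigit).isEmpty) = true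
        · rw [if_pos hp]
          have htl2 : (String.ofList ('+' :: cs.filter PySem.Chars.isdigit)).toList
              = '+' :: cs.filter PySem.Chars.isdigit := by simp
          rw [htl2, pv_replace_one]
          simp only [List.flatMap_cons, if_pos rfl, List.nil_append]
          rw [← pv_replace_one, pv_replace_plus_digits _ hdigall]
          simp
        · rw [if_neg hp]
          have htl2 : (String.ofList (cs.filter PySem.Chars.isdigit)).toList
              = cs.filter PySem.Chars.isdigit := by simp
          rw [htl2, pv_replace_plus_digits _ hdigall]
      rw [hlen]
    · have hflag' : (cs.any PySem.Chars.isalpha && cs.any PySem.Chars.isdigit) = false := by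
        simpa using hflag
      rw [hflag']
      simp only [Bool.not_false, if_true]
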